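-- pv_equiv track=rewrite | github.com/Lzxhh/- | 编译原理/编译原理实验3/main.py | judge_select
-- ===== SOURCE A (Python) =====
-- def judge_select(select):
--     for a1 in select:
--         for a2 in select:
--             # 判断两个select集是有否相同左部产生式的
--             if a1[0][0] == a2[0][0] and a1[0][1] != a2[0][1]:
--                 intersection = list(set(a1[1]).intersection(set(a2[1])))
--                 if intersection != []:
--                     return True
--     return False
-- ===== SOURCE B (Python) =====
-- def judge_select(select):
--     # Conflict exists iff some (left, terminal) key is carried by two distinct
--     # (left, prod_id, terminal) triples: dedup triples once, then compare counts.
--     triples = {(left, pid, t) for (left, pid), terms in select for t in terms}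
--     keys = {(left, t) for (left, pid, t) in triples}
--     return len(keys) < len(triples)
-- ===== Notes on version B (the rewrite author's own statement) =====
-- stated objective: alternative
-- what changed: Replaces A's quadratic all-pairs set-intersection scan with a single flattening pass: deduplicate all (left, prod_id, terminal) triples and report a conflict exactly when projecting away prod_id shrinks the set.
import Mathlib
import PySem

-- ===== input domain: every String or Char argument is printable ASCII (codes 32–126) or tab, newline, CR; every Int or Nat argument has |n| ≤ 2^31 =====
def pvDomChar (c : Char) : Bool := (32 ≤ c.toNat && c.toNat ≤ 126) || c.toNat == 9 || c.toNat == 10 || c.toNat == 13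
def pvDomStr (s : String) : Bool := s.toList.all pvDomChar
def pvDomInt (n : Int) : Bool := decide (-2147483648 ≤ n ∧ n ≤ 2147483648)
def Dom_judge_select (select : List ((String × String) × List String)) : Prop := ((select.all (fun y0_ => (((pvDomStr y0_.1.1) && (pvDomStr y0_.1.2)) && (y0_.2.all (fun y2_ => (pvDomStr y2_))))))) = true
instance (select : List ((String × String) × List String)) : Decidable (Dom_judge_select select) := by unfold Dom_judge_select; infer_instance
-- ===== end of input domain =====

-- B replaces A's quadratic all-pairs set-intersection scan by one flattening pass:
-- deduplicate the (left, prod_id, terminal) triples and compare the count before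
-- and after projecting away prod_id (objective: alternative algorithm).

-- ===== PORT A =====
def judge_select (select : List ((String × String) × List String)) : Bool :=
  select.any (fun a1 => select.any (fun a2 =>
    (a1.1.1 == a2.1.1 && a1.1.2 != a2.1.2) &&
      decide (PySem.Set.inter (PySem.Set.ofList a1.2) (PySem.Set.ofList a2.2) ≠ ([] : List String))))

-- ===== PORT B =====
def judge_select_alt (select : List ((String × String) × List String)) : Bool :=
  let triples : PySem.Set (String × String × String) :=
    PySem.Set.ofList (select.flatMap (fun e => e.2.map (fun t => (e.1.1, e.1.2, t))))
  let keys : PySem.Set (String × String) :=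
    PySem.Set.ofList (triples.map (fun tr => (tr.1, tr.2.2)))
  decide (PySem.Set.len keys < PySem.Set.len triples)

-- ===== PRECONDITION & SPEC =====
def Spec_judge_select (select : List ((String × String) × List String)) (out : Bool) : Prop := out = judge_select_alt select
instance (select : List ((String × String) × List String)) (out : Bool) : Decidable (Spec_judge_select select out) := by unfold Spec_judge_select; infer_instance

-- ===== CLAIM (what is proved, stated in full; the proofs are below) =====
def Claim_equal_judge_select : Prop := ∀ (select : List ((String × String) × List String)), Dom_judge_select select → Spec_judge_select select (judge_select select)

-- ===== LEMMAS AND PROOFS =====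

-- The conflict condition both programs decide.
def Conflict (select : List ((String × String) × List String)) : Prop :=
  ∃ e1 ∈ select, ∃ e2 ∈ select, e1.1.1 = e2.1.1 ∧ e1.1.2 ≠ e2.1.2 ∧ ∃ t, t ∈ e1.2 ∧ t ∈ e2.2

theorem judge_select_iff (select : List ((String × String) × List String)) :
    judge_select select = true ↔ Conflict select := by
  simp only [judge_select, Conflict, List.any_eq_true, Bool.and_eq_true, beq_iff_eq,
    bne_iff_ne, decide_eq_true_eq, ne_eq]
  constructor
  · rintro ⟨a1, h1, a2, h2, ⟨hl, hp⟩, hne⟩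
    rcases List.exists_mem_of_ne_nil _ hne with ⟨t, ht⟩
    rw [PySem.Set.mem_inter, PySem.Set.mem_ofList, PySem.Set.mem_ofList] at ht
    exact ⟨a1, h1, a2, h2, hl, hp, t, ht⟩
  · rintro ⟨a1, h1, a2, h2, hl, hp, t, ht1, ht2⟩
    refine ⟨a1, h1, a2, h2, ⟨hl, hp⟩, fun hnil => ?_⟩
    have : t ∈ PySem.Set.inter (PySem.Set.ofList a1.2) (PySem.Set.ofList a2.2) := by
      rw [PySem.Set.mem_inter, PySem.Set.mem_ofList, PySem.Set.mem_ofList]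
      exact ⟨ht1, ht2⟩
    simp [hnil] at this

-- set(triples) loses length under the (left, terminal) projection iff two distinct
-- triples share a key, iff two productions conflict.
theorem judge_select_alt_iff (select : List ((String × String) × List String)) :
    judge_select_alt select = true ↔ Conflict select := by
  unfold judge_select_alt
  rw [decide_eq_true_eq]
  set S := PySem.Set.ofList (select.flatMap (fun e => e.2.map (fun t => (e.1.1, e.1.2, t)))) with hS
  set K := PySem.Set.ofList (S.map (fun tr => (tr.1, tr.2.2))) with hK
  have hmemS : ∀ x : String × String × String,
      x ∈ S ↔ ∃ e ∈ select, ∃ t ∈ e.2, (e.1.1, e.1.2, t) = x := by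
    intro x
    rw [hS, PySem.Set.mem_ofList, List.mem_flatMap]
    constructor
    · rintro ⟨e, he, hx⟩
      rcases List.mem_map.mp hx with ⟨t, ht, rfl⟩
      exact ⟨e, he, t, ht, rfl⟩
    · rintro ⟨e, he, t, ht, rfl⟩
      exact ⟨e, he, List.mem_map.mpr ⟨t, ht, rfl⟩⟩
  have hcore : PySem.Set.len K < PySem.Set.len S ↔
      ∃ x ∈ S, ∃ y ∈ S, (x.1, x.2.2) = (y.1, y.2.2) ∧ x ≠ y := by
    have hSnd : S.Nodup := PySem.Set.nodup_ofList _
    have hKnd : K.Nodup := PySem.Set.nodup_ofList _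
    have hKfin : K.toFinset = S.toFinset.image (fun tr => (tr.1, tr.2.2)) := by
      ext k
      simp [hK, PySem.Set.mem_ofList, List.mem_map]
    have hlenK : PySem.Set.len K = K.toFinset.card := by
      simp [PySem.Set.len, List.toFinset_card_of_nodup hKnd]
    have hlenS : PySem.Set.len S = S.toFinset.card := by
      simp [PySem.Set.len, List.toFinset_card_of_nodup hSnd]
    rw [hlenK, hlenS, hKfin]
    constructor
    · intro hlt
      have hni : ¬ Set.InjOn (fun tr : String × String × String => (tr.1, tr.2.2)) S.toFinset := by
        intro hinj
        rw [Finset.card_image_of_injOn hinj] at hlt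
        exact lt_irrefl _ hlt
      rw [Set.InjOn] at hni
      push Not at hni
      rcases hni with ⟨x, hx, y, hy, hfe, hne⟩
      exact ⟨x, by simpa using hx, y, by simpa using hy, hfe, hne⟩
    · rintro ⟨x, hx, y, hy, hfe, hne⟩
      have hle := Finset.card_image_le (s := S.toFinset)
        (f := fun tr : String × String × String => (tr.1, tr.2.2))
      rcases lt_or_eq_of_le hle with h | h
      · exact_mod_cast h
      · exact absurd (Finset.injOn_of_card_image_eq h (by simpa using hx) (by simpa using hy) hfe) hne
  rw [hcore]
  constructor
  · rintro ⟨x, hx, y, hy, hfe, hne⟩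
    rcases (hmemS x).mp hx with ⟨e1, he1, t1, ht1, hx1⟩
    rcases (hmemS y).mp hy with ⟨e2, he2, t2, ht2, hy1⟩
    subst hx1; subst hy1
    rcases Prod.mk.injEq .. ▸ hfe with ⟨h1, h2⟩
    simp only at h1 h2
    refine ⟨e1, he1, e2, he2, h1, fun hp => hne ?_, t1, ht1, h2 ▸ ht2⟩
    simp [h1, h2, hp]
  · rintro ⟨e1, he1, e2, he2, hl, hp, t, ht1, ht2⟩
    refine ⟨(e1.1.1, e1.1.2, t), (hmemS _).mpr ⟨e1, he1, t, ht1, rfl⟩,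
      (e2.1.1, e2.1.2, t), (hmemS _).mpr ⟨e2, he2, t, ht2, rfl⟩, by simp [hl], ?_⟩
    intro hxy
    exact hp (congrArg (fun z => z.2.1) hxy)

theorem judge_select_spec : Claim_equal_judge_select := by
  intro select _
  unfold Spec_judge_select
  exact Bool.eq_iff_iff.mpr ((judge_select_iff select).trans (judge_select_alt_iff select).symm)
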